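-- pv_equiv track=rewrite | github.com/chang2eee/Coding-Test | 프로그래머스/1/1845. 폰켓몬/폰켓몬.py | solution
-- ===== SOURCE A (Python) =====
-- def solution(nums):
--     count = 0
--     size_count = {}
--     for size in nums:
--         if size in size_count:
--             size_count[size] += 1
--         else:
--             size_count[size] = 1
--     sorted_counts = sorted(size_count.values(), reverse=True)
--     you_take = int(sum(sorted_counts)/2)
--     answer = min(you_take,len(sorted_counts))
--     return answer
-- ===== SOURCE B (Python) =====
-- def solution(nums):
--     s = sorted(nums)
--     distinct = 0 if not s else 1 + sum(1 for a, b in zip(s, s[1:]) if a != b)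
--     return min(len(nums) // 2, distinct)
-- ===== Notes on version B (the rewrite author's own statement) =====
-- stated objective: alternative
-- what changed: B replaces A's frequency-dict (count per type, sum and length of its values) by sorting a copy of the input and counting distinct values as adjacent boundaries in one scan, returning min(len(nums)//2, distinct).
import Mathlib
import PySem

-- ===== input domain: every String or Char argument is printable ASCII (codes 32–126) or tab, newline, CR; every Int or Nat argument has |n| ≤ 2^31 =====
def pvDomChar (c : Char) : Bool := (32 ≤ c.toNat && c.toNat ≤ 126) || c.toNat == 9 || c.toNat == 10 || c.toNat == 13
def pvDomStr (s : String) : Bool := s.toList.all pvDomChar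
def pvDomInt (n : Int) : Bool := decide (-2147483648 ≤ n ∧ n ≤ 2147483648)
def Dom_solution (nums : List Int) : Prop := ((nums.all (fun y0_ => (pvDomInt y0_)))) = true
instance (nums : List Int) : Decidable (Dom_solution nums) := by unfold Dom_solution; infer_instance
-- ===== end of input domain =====

-- B replaces A's frequency dict by sort-then-scan distinct counting; same return value, no speed claim.

-- ===== PORT A =====
def solution (nums : List Int) : Int :=
  -- size_count built by A's loop (if key present: += 1, else: = 1)
  let size_count : PySem.Dict Int Int := nums.foldl
    (fun d size => if d.contains size then d.insert size (d.getD size 0 + 1)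
                   else d.insert size 1) PySem.Dict.empty
  let sorted_counts := PySem.List.sorted size_count.values (fun x => x) true
  -- int(sum(...)/2): truncating float division; exact here since the sum is ≤ len(nums) < 2^53
  let you_take := PySem.Int.truncdiv sorted_counts.sum 2
  min you_take (sorted_counts.length : Int)

-- ===== PORT B =====
def solution_alt (nums : List Int) : Int :=
  let s := PySem.List.sorted nums (fun x => x) false
  -- sum(1 for a, b in zip(s, s[1:]) if a != b) is a count over the zipped pairs
  let distinct : Int :=
    if s = [] then 0
    else 1 + ((s.zip (PySem.List.slice s (some 1) none)).countP (fun p => p.1 != p.2) : Int)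
  min (PySem.Int.floordiv (nums.length : Int) 2) distinct

-- ===== PRECONDITION & SPEC =====
def Spec_solution (nums : List Int) (out : Int) : Prop := out = solution_alt nums
instance (nums : List Int) (out : Int) : Decidable (Spec_solution nums out) := by unfold Spec_solution; infer_instance

-- ===== CLAIM (what is proved, stated in full; the proofs are below) =====
def Claim_equal_solution : Prop := ∀ (nums : List Int), Dom_solution nums → Spec_solution nums (solution nums)

-- ===== LEMMAS AND PROOFS =====

-- A's branching update loop is exactly collections.Counter
lemma solA_dict_eq (nums : List Int) :
    nums.foldl (fun d size => if d.contains size then d.insert size (d.getD size 0 + 1)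
      else d.insert size 1) (PySem.Dict.empty : PySem.Dict Int Int)
      = PySem.Dict.counter nums := by
  have hf : (fun (d : PySem.Dict Int Int) size =>
        if d.contains size then d.insert size (d.getD size 0 + 1) else d.insert size 1)
      = fun d x => d.insert x (d.getD x 0 + 1) := by
    funext d x
    by_cases h : d.contains x
    · simp [h]
    · have h' : d.contains x = false := by simpa using h
      simp [h, PySem.Dict.getD_of_not_contains]
  rw [hf, PySem.Dict.foldl_insert_getD_add_one_eq_counter]

-- PySem's ordered dedup has the same Finset of members as the list
lemma toFinset_pydedup (nums : List Int) :
    (PySem.List.dedup nums).toFinset = nums.toFinset := by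
  ext x; simp

-- sum of the counter's values is the length of the list
lemma sum_counts (nums : List Int) :
    ((PySem.List.dedup nums).map (fun k => (nums.count k : Int))).sum = (nums.length : Int) := by
  have hperm : (PySem.List.dedup nums).Perm nums.dedup := by
    refine (List.perm_ext_iff_of_nodup (PySem.List.nodup_dedup nums) nums.nodup_dedup).mpr ?_
    intro x; simp
  have h1 : ((PySem.List.dedup nums).map (fun k => nums.count k)).sum
      = ((nums.dedup).map (fun k => nums.count k)).sum :=
    (hperm.map _).sum_eq
  have h2 := List.sum_map_count_dedup_eq_length nums
  have : ((PySem.List.dedup nums).map (fun k => (nums.count k : Int))).sum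
      = (((PySem.List.dedup nums).map (fun k => nums.count k)).sum : Int) := by
    induction PySem.List.dedup nums with
    | nil => simp
    | cons a t ih =>
        rw [List.map_cons, List.map_cons, List.sum_cons, List.sum_cons, ih]
        push_cast
        ring
  rw [this, h1, h2]

-- boundary count on a sorted list = number of distinct elements
lemma boundaries_card (s : List Int) (hs : s.Pairwise (· ≤ ·)) :
    (if s = [] then 0 else 1 + (s.zip s.tail).countP (fun p => p.1 != p.2)) = s.toFinset.card := by
  induction s with
  | nil => simp
  | cons a t ih =>
    cases t with
    | nil => simp
    | cons b u =>
      have hab : a ≤ b := (List.pairwise_cons.mp hs).1 b (by simp)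
      have hau : ∀ x ∈ u, a ≤ x := fun x hx => (List.pairwise_cons.mp hs).1 x (by simp [hx])
      have ht : (b :: u).Pairwise (· ≤ ·) := (List.pairwise_cons.mp hs).2
      have hbu : ∀ x ∈ u, b ≤ x := fun x hx => (List.pairwise_cons.mp ht).1 x hx
      have ih' := ih ht
      rw [if_neg (by simp)] at ih' ⊢
      simp only [List.tail_cons, List.zip_cons_cons, List.countP_cons] at ih' ⊢
      by_cases hab2 : a = b
      · subst hab2
        simp only [bne_self_eq_false, if_neg Bool.false_ne_true, Nat.add_zero]
        rw [ih']
        simp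
      · have hnotmem : a ∉ (b :: u).toFinset := by
          simp only [List.toFinset_cons, Finset.mem_insert, List.mem_toFinset]
          rintro (h | h)
          · exact hab2 h
          · exact hab2 (le_antisymm hab (hbu a h))
        rw [List.toFinset_cons, Finset.card_insert_of_notMem hnotmem, ← ih']
        simp [bne_iff_ne, hab2]
        omega

-- dedup length = card of the Finset of members
lemma dedup_length_card (nums : List Int) :
    (PySem.List.dedup nums).length = nums.toFinset.card := by
  rw [← toFinset_pydedup, List.toFinset_card_of_nodup (PySem.List.nodup_dedup nums)]

-- ===== VERDICT (by name: the statement is the Claim_ definition above) =====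
theorem solution_spec : Claim_equal_solution := by
  intro nums _
  show solution nums = solution_alt nums
  simp only [solution, solution_alt]
  rw [solA_dict_eq]
  -- A side: values of the counter
  have hvals : (PySem.Dict.counter nums).values
      = (PySem.List.dedup nums).map (fun k => (nums.count k : Int)) := by
    show ((PySem.Dict.counter nums).items).map (·.2) = _
    rw [PySem.Dict.items_counter]
    simp [PySem.List.dedup_eq_ofList]
  -- sorted values: permutation, so sum and length agree with the unsorted values
  have hperm := PySem.List.sorted_perm (PySem.Dict.counter nums).values (fun x : Int => x) true
  have hsum : (PySem.List.sorted (PySem.Dict.counter nums).values (fun x => x) true).sum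
      = (nums.length : Int) := by rw [hperm.sum_eq, hvals, sum_counts]
  have hlen : (PySem.List.sorted (PySem.Dict.counter nums).values (fun x => x) true).length
      = nums.toFinset.card := by
    rw [hperm.length_eq, hvals, List.length_map, dedup_length_card]
  rw [hsum, hlen]
  -- int(L/2) = L // 2 for the nonnegative cast length
  have htrunc : PySem.Int.truncdiv (nums.length : Int) 2
      = PySem.Int.floordiv (nums.length : Int) 2 := by
    simp [PySem.Int.truncdiv]
  rw [htrunc]
  -- B side: the boundary scan counts the distinct members
  set s := PySem.List.sorted nums (fun x : Int => x) false with hsdef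
  have hsp : s.Pairwise (· ≤ ·) := by
    simpa using PySem.List.sorted_pairwise nums (fun x : Int => x)
  have hsperm : s.Perm nums := PySem.List.sorted_perm nums (fun x : Int => x) false
  have hsl : PySem.List.slice s (some 1) none = s.tail := PySem.List.slice_from_one s
  have hdist : (if s = [] then (0 : Int)
      else 1 + ((s.zip (PySem.List.slice s (some 1) none)).countP (fun p => p.1 != p.2) : Int))
      = (nums.toFinset.card : Int) := by
    rw [hsl, ← List.toFinset_eq_of_perm _ _ hsperm, ← boundaries_card s hsp]
    split_ifs with h
    · simp
    · push_cast; ring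
  rw [hdist]
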